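-- pv_equiv track=rewrite | github.com/ablab/HORmon | src/HORmon_pipeline/Hybrid.py | isHybridContext
-- ===== SOURCE A (Python) =====
-- def isHybridContext(main_mn, mn1, mn2, kcnt2, edgeThr=100):
--     mnlst = {x[0] for x in kcnt2.keys()}
--     for mn in mnlst:
--         if (mn, mn1) in kcnt2 and kcnt2[(mn, mn1)] > edgeThr and \
--                 (mn, main_mn) in kcnt2 and kcnt2[(mn, main_mn)] > edgeThr:
--            break
--     else:
--         return False
--
--     for mn in mnlst:
--         if (mn2, mn) in kcnt2 and kcnt2[(mn2, mn)] > edgeThr and \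
--                 (main_mn, mn) in kcnt2 and kcnt2[(main_mn, mn)] > edgeThr:
--            break
--     else:
--         return False
--     return True
-- ===== SOURCE B (Python) =====
-- def isHybridContext(main_mn, mn1, mn2, kcnt2, edgeThr=100):
--     firsts = set()
--     pred_mn1 = set()
--     pred_main = set()
--     succ_mn2 = set()
--     succ_main = set()
--     for (a, b), v in kcnt2.items():
--         firsts.add(a)
--         if v > edgeThr and b == mn1:
--             pred_mn1.add(a)
--         if v > edgeThr and b == main_mn:
--             pred_main.add(a)
--         if v > edgeThr and a == mn2:
--             succ_mn2.add(b)
--         if v > edgeThr and a == main_mn: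
--             succ_main.add(b)
--     return bool(pred_mn1 & pred_main) and bool(succ_mn2 & succ_main & firsts)
-- ===== Notes on version B (the rewrite author's own statement) =====
-- stated objective: alternative
-- what changed: One sweep over kcnt2.items() builds predecessor/successor index sets and the answer is decided by set intersections, instead of iterating the set of first coordinates and doing four paired dict lookups per candidate.
import Mathlib
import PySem

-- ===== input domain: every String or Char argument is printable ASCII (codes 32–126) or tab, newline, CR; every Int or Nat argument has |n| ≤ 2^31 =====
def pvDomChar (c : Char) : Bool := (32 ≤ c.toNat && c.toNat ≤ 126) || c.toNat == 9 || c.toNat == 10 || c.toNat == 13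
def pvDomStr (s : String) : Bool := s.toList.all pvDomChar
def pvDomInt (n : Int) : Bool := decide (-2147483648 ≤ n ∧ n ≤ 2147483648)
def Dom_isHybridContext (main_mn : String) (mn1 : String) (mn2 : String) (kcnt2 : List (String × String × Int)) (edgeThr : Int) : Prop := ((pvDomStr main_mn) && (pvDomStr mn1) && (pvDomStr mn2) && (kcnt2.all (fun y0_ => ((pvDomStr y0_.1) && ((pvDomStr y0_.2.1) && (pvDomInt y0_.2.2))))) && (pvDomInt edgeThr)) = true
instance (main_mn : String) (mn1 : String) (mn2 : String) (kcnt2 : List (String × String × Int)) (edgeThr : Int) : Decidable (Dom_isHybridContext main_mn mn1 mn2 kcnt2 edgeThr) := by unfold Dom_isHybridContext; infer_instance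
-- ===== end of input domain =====

-- B replaces A's scan over the set of first coordinates (with four dict lookups per candidate)
-- by one sweep over the dict's items building index sets, decided by set intersections;
-- objective: alternative (same asymptotic cost, different data-structure decomposition).

-- ===== PORT A =====
def isHybridContext (main_mn : String) (mn1 : String) (mn2 : String) (kcnt2 : List (String × String × Int)) (edgeThr : Int) : Bool :=
  let d : PySem.Dict (String × String) Int := PySem.Dict.ofList (kcnt2.map (fun x => ((x.1, x.2.1), x.2.2)))
  let mnlst : PySem.Set String := PySem.Set.ofList ((PySem.Dict.keys d).map (fun x => x.1))
  -- '(k) in kcnt2 and kcnt2[k] > edgeThr' for one key k: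
  let chk : String × String → Bool := fun k =>
    match PySem.Dict.get? d k with
    | some v => decide (edgeThr < v)
    | none => false
  -- first for-loop with break / else: return False  (existence over the set; order-independent)
  if mnlst.any (fun mn => chk (mn, mn1) && chk (mn, main_mn)) then
    -- second for-loop with break / else: return False
    if mnlst.any (fun mn => chk (mn2, mn) && chk (main_mn, mn)) then
      true
    else false
  else false

-- ===== PORT B =====
-- loop body of Source B: state = (firsts, pred_mn1, pred_main, succ_mn2, succ_main)
def pvStepB (main_mn : String) (mn1 : String) (mn2 : String) (edgeThr : Int)
    (st : PySem.Set String × PySem.Set String × PySem.Set String × PySem.Set String × PySem.Set String)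
    (kv : (String × String) × Int) :
    PySem.Set String × PySem.Set String × PySem.Set String × PySem.Set String × PySem.Set String :=
  (PySem.Set.add st.1 kv.1.1,
   if edgeThr < kv.2 && kv.1.2 == mn1 then PySem.Set.add st.2.1 kv.1.1 else st.2.1,
   if edgeThr < kv.2 && kv.1.2 == main_mn then PySem.Set.add st.2.2.1 kv.1.1 else st.2.2.1,
   if edgeThr < kv.2 && kv.1.1 == mn2 then PySem.Set.add st.2.2.2.1 kv.1.2 else st.2.2.2.1,
   if edgeThr < kv.2 && kv.1.1 == main_mn then PySem.Set.add st.2.2.2.2 kv.1.2 else st.2.2.2.2)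

def isHybridContext_alt (main_mn : String) (mn1 : String) (mn2 : String) (kcnt2 : List (String × String × Int)) (edgeThr : Int) : Bool :=
  let d : PySem.Dict (String × String) Int := PySem.Dict.ofList (kcnt2.map (fun x => ((x.1, x.2.1), x.2.2)))
  let st := (PySem.Dict.items d).foldl (pvStepB main_mn mn1 mn2 edgeThr)
    (PySem.Set.empty, PySem.Set.empty, PySem.Set.empty, PySem.Set.empty, PySem.Set.empty)
  -- bool(pred_mn1 & pred_main) and bool(succ_mn2 & succ_main & firsts)
  !(PySem.Set.inter st.2.1 st.2.2.1).isEmpty &&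
    !(PySem.Set.inter (PySem.Set.inter st.2.2.2.1 st.2.2.2.2) st.1).isEmpty

-- ===== PRECONDITION & SPEC =====
def Spec_isHybridContext (main_mn : String) (mn1 : String) (mn2 : String) (kcnt2 : List (String × String × Int)) (edgeThr : Int) (out : Bool) : Prop := out = isHybridContext_alt main_mn mn1 mn2 kcnt2 edgeThr
instance (main_mn : String) (mn1 : String) (mn2 : String) (kcnt2 : List (String × String × Int)) (edgeThr : Int) (out : Bool) : Decidable (Spec_isHybridContext main_mn mn1 mn2 kcnt2 edgeThr out) := by unfold Spec_isHybridContext; infer_instance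

-- ===== CLAIM (what is proved, stated in full; the proofs are below) =====
def Claim_equal_isHybridContext : Prop := ∀ (main_mn : String) (mn1 : String) (mn2 : String) (kcnt2 : List (String × String × Int)) (edgeThr : Int), Dom_isHybridContext main_mn mn1 mn2 kcnt2 edgeThr → Spec_isHybridContext main_mn mn1 mn2 kcnt2 edgeThr (isHybridContext main_mn mn1 mn2 kcnt2 edgeThr)

-- ===== LEMMAS AND PROOFS =====

-- membership in a conditional-add fold
lemma pv_mem_foldl_add_if {α : Type} (c : α → Bool) (g : α → String) (l : List α)
    (s0 : PySem.Set String) (y : String) :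
    y ∈ l.foldl (fun s kv => if c kv then PySem.Set.add s (g kv) else s) s0 ↔
      y ∈ s0 ∨ ∃ kv ∈ l, c kv = true ∧ g kv = y := by
  induction l generalizing s0 with
  | nil => simp
  | cons a t ih =>
    simp only [List.foldl_cons, ih]
    by_cases h : c a = true
    · rw [if_pos h]
      simp only [PySem.Set.mem_add]
      constructor
      · rintro (⟨hs | he⟩ | ⟨kv, hkv, hc, hg⟩)
        · exact Or.inl hs
        · exact Or.inr ⟨a, List.mem_cons.mpr (Or.inl rfl), h, he.symm⟩
        · exact Or.inr ⟨kv, List.mem_cons_of_mem a hkv, hc, hg⟩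
      · rintro (hs | ⟨kv, hkv, hc, hg⟩)
        · exact Or.inl (Or.inl hs)
        · rcases List.mem_cons.mp hkv with rfl | hkv'
          · exact Or.inl (Or.inr hg.symm)
          · exact Or.inr ⟨kv, hkv', hc, hg⟩
    · rw [if_neg h]
      constructor
      · rintro (hs | ⟨kv, hkv, hc, hg⟩)
        · exact Or.inl hs
        · exact Or.inr ⟨kv, List.mem_cons_of_mem a hkv, hc, hg⟩
      · rintro (hs | ⟨kv, hkv, hc, hg⟩)
        · exact Or.inl hs
        · rcases List.mem_cons.mp hkv with rfl | hkv'
          · exact absurd hc h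
          · exact Or.inr ⟨kv, hkv', hc, hg⟩

-- membership in an unconditional-add fold
lemma pv_mem_foldl_add {α : Type} (g : α → String) (l : List α)
    (s0 : PySem.Set String) (y : String) :
    y ∈ l.foldl (fun s kv => PySem.Set.add s (g kv)) s0 ↔
      y ∈ s0 ∨ ∃ kv ∈ l, g kv = y := by
  induction l generalizing s0 with
  | nil => simp
  | cons a t ih =>
    simp only [List.foldl_cons, ih, PySem.Set.mem_add]
    constructor
    · rintro (⟨hs | he⟩ | ⟨kv, hkv, hg⟩)
      · exact Or.inl hs
      · exact Or.inr ⟨a, List.mem_cons.mpr (Or.inl rfl), he.symm⟩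
      · exact Or.inr ⟨kv, List.mem_cons_of_mem a hkv, hg⟩
    · rintro (hs | ⟨kv, hkv, hg⟩)
      · exact Or.inl (Or.inl hs)
      · rcases List.mem_cons.mp hkv with rfl | hkv'
        · exact Or.inl (Or.inr hg.symm)
        · exact Or.inr ⟨kv, hkv', hg⟩

-- the fold over pvStepB splits into five independent folds
lemma pv_foldB_split (main_mn mn1 mn2 : String) (edgeThr : Int)
    (l : List ((String × String) × Int))
    (st : PySem.Set String × PySem.Set String × PySem.Set String × PySem.Set String × PySem.Set String) :
    l.foldl (pvStepB main_mn mn1 mn2 edgeThr) st =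
      (l.foldl (fun s kv => PySem.Set.add s kv.1.1) st.1,
       l.foldl (fun s kv => if edgeThr < kv.2 && kv.1.2 == mn1 then PySem.Set.add s kv.1.1 else s) st.2.1,
       l.foldl (fun s kv => if edgeThr < kv.2 && kv.1.2 == main_mn then PySem.Set.add s kv.1.1 else s) st.2.2.1,
       l.foldl (fun s kv => if edgeThr < kv.2 && kv.1.1 == mn2 then PySem.Set.add s kv.1.2 else s) st.2.2.2.1,
       l.foldl (fun s kv => if edgeThr < kv.2 && kv.1.1 == main_mn then PySem.Set.add s kv.1.2 else s) st.2.2.2.2) := by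
  induction l generalizing st with
  | nil => simp
  | cons a t ih =>
    simp only [List.foldl_cons, ih, pvStepB]

-- 'chk' is true exactly when some item with that key passes the threshold (keys are nodup)
lemma pv_chk_iff (d : PySem.Dict (String × String) Int) (hnd : d.keys.Nodup)
    (edgeThr : Int) (k : String × String) :
    (match PySem.Dict.get? d k with
     | some v => decide (edgeThr < v)
     | none => false) = true ↔ ∃ v, (k, v) ∈ d.items ∧ edgeThr < v := by
  cases h : PySem.Dict.get? d k with
  | none =>
    constructor
    · intro hf; exact absurd hf (by simp)
    · rintro ⟨v, hv, _⟩
      have := PySem.Dict.get?_of_mem_items d hv hnd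
      rw [h] at this; cases this
  | some v =>
    simp only [decide_eq_true_eq]
    constructor
    · intro hv
      exact ⟨v, (PySem.Dict.get?_eq_some_iff_mem_items d k v hnd).1 h, hv⟩
    · rintro ⟨w, hw, hwt⟩
      have := PySem.Dict.get?_of_mem_items d hw hnd
      rw [h] at this
      cases this
      exact hwt

lemma pv_if_and (a b : Bool) : (if a then (if b then true else false) else false) = (a && b) := by
  cases a <;> cases b <;> rfl

lemma pv_not_isEmpty_iff {α : Type} (l : List α) : (!l.isEmpty) = true ↔ ∃ x, x ∈ l := by
  cases l <;> simp

-- ===== VERDICT (by name: the statement is the Claim_ definition above) =====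
theorem isHybridContext_spec : Claim_equal_isHybridContext := by
  intro main_mn mn1 mn2 kcnt2 edgeThr _
  unfold Spec_isHybridContext
  simp only [isHybridContext, isHybridContext_alt]
  set d : PySem.Dict (String × String) Int := PySem.Dict.ofList (kcnt2.map (fun x => ((x.1, x.2.1), x.2.2))) with hd
  have hnd : d.keys.Nodup := PySem.Dict.nodup_keys_ofList _
  rw [pv_foldB_split]
  set l := PySem.Dict.items d with hl
  have hkeys : PySem.Dict.keys d = l.map Prod.fst := rfl
  set chk : String × String → Bool := fun k =>
    match PySem.Dict.get? d k with
    | some v => decide (edgeThr < v)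
    | none => false with hchk
  -- membership characterisations
  have hmn : ∀ y, y ∈ PySem.Set.ofList ((PySem.Dict.keys d).map (fun x => x.1)) ↔ ∃ kv ∈ l, kv.1.1 = y := by
    intro y
    rw [PySem.Set.mem_ofList, hkeys, List.map_map]
    simp [List.mem_map]
  have hchk' : ∀ k, chk k = true ↔ ∃ v, (k, v) ∈ l ∧ edgeThr < v := by
    intro k; exact pv_chk_iff d hnd edgeThr k
  -- first condition
  have h1 : (PySem.Set.ofList ((PySem.Dict.keys d).map (fun x => x.1))).any
        (fun mn => chk (mn, mn1) && chk (mn, main_mn)) =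
      (!(PySem.Set.inter
          (l.foldl (fun s kv => if edgeThr < kv.2 && kv.1.2 == mn1 then PySem.Set.add s kv.1.1 else s) PySem.Set.empty)
          (l.foldl (fun s kv => if edgeThr < kv.2 && kv.1.2 == main_mn then PySem.Set.add s kv.1.1 else s) PySem.Set.empty)).isEmpty) := by
    rw [Bool.eq_iff_iff, List.any_eq_true, pv_not_isEmpty_iff]
    constructor
    · rintro ⟨mn, hmem, hb⟩
      rw [Bool.and_eq_true, hchk', hchk'] at hb
      obtain ⟨⟨v1, hv1, ht1⟩, ⟨v2, hv2, ht2⟩⟩ := hb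
      refine ⟨mn, ?_⟩
      rw [PySem.Set.mem_inter, pv_mem_foldl_add_if, pv_mem_foldl_add_if]
      constructor
      · exact Or.inr ⟨((mn, mn1), v1), hv1, by simp [ht1]⟩
      · exact Or.inr ⟨((mn, main_mn), v2), hv2, by simp [ht2]⟩
    · rintro ⟨y, hy⟩
      rw [PySem.Set.mem_inter, pv_mem_foldl_add_if, pv_mem_foldl_add_if] at hy
      obtain ⟨h1', h2'⟩ := hy
      rcases h1' with h | ⟨kv1, hkv1, hc1, hg1⟩
      · simp [PySem.Set.empty] at h
      rcases h2' with h | ⟨kv2, hkv2, hc2, hg2⟩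
      · simp [PySem.Set.empty] at h
      rw [Bool.and_eq_true, decide_eq_true_eq, beq_iff_eq] at hc1 hc2
      refine ⟨y, (hmn y).2 ⟨kv1, hkv1, hg1⟩, ?_⟩
      rw [Bool.and_eq_true, hchk', hchk']
      constructor
      · exact ⟨kv1.2, by rwa [show (y, mn1) = kv1.1 from by rw [← hg1, ← hc1.2]], hc1.1⟩
      · exact ⟨kv2.2, by rwa [show (y, main_mn) = kv2.1 from by rw [← hg2, ← hc2.2]], hc2.1⟩
  -- second condition
  have h2 : (PySem.Set.ofList ((PySem.Dict.keys d).map (fun x => x.1))).any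
        (fun mn => chk (mn2, mn) && chk (main_mn, mn)) =
      (!(PySem.Set.inter
          (PySem.Set.inter
            (l.foldl (fun s kv => if edgeThr < kv.2 && kv.1.1 == mn2 then PySem.Set.add s kv.1.2 else s) PySem.Set.empty)
            (l.foldl (fun s kv => if edgeThr < kv.2 && kv.1.1 == main_mn then PySem.Set.add s kv.1.2 else s) PySem.Set.empty))
          (l.foldl (fun s kv => PySem.Set.add s kv.1.1) PySem.Set.empty)).isEmpty) := by
    rw [Bool.eq_iff_iff, List.any_eq_true, pv_not_isEmpty_iff]
    constructor
    · rintro ⟨mn, hmem, hb⟩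
      rw [Bool.and_eq_true, hchk', hchk'] at hb
      obtain ⟨⟨v1, hv1, ht1⟩, ⟨v2, hv2, ht2⟩⟩ := hb
      obtain ⟨kv0, hkv0, hg0⟩ := (hmn mn).1 hmem
      refine ⟨mn, ?_⟩
      rw [PySem.Set.mem_inter, PySem.Set.mem_inter, pv_mem_foldl_add_if, pv_mem_foldl_add_if, pv_mem_foldl_add]
      refine ⟨⟨Or.inr ⟨((mn2, mn), v1), hv1, by simp [ht1]⟩, Or.inr ⟨((main_mn, mn), v2), hv2, by simp [ht2]⟩⟩, Or.inr ⟨kv0, hkv0, hg0⟩⟩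
    · rintro ⟨y, hy⟩
      rw [PySem.Set.mem_inter, PySem.Set.mem_inter, pv_mem_foldl_add_if, pv_mem_foldl_add_if, pv_mem_foldl_add] at hy
      obtain ⟨⟨h1', h2'⟩, h3'⟩ := hy
      rcases h1' with h | ⟨kv1, hkv1, hc1, hg1⟩
      · simp [PySem.Set.empty] at h
      rcases h2' with h | ⟨kv2, hkv2, hc2, hg2⟩
      · simp [PySem.Set.empty] at h
      rcases h3' with h | ⟨kv0, hkv0, hg0⟩
      · simp [PySem.Set.empty] at h
      rw [Bool.and_eq_true, decide_eq_true_eq, beq_iff_eq] at hc1 hc2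
      refine ⟨y, (hmn y).2 ⟨kv0, hkv0, hg0⟩, ?_⟩
      rw [Bool.and_eq_true, hchk', hchk']
      constructor
      · exact ⟨kv1.2, by rwa [show (mn2, y) = kv1.1 from by rw [← hg1, ← hc1.2]], hc1.1⟩
      · exact ⟨kv2.2, by rwa [show (main_mn, y) = kv2.1 from by rw [← hg2, ← hc2.2]], hc2.1⟩
  rw [h1, h2]
  exact pv_if_and _ _
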